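-- pv_equiv track=rewrite | github.com/sociedade-do-pastel/simple3 | lexer/afds.py | afd_str
-- ===== SOURCE A (Python) =====
-- def afd_str(lex):
--     """
--     Função que verifica uma string através de seu autômato
--
--     Argumentos:
--         lex - Lexema a ser testado
--
--     Retorno:
--         - Sucesso: ('str', lex)
--         - Falha: None
--     """
--     afd = {
--         0: {'"': 1},
--         1: {'"': 2},
--         2: {}
--     }
--     final_states = [2]
--     current_state = 0
--
--     for word in str(lex):
--         if current_state == 1:
--             current_state = afd[current_state].get(word, 1)
--         else:
--             current_state = afd[current_state].get(word)
--             if current_state is None: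
--                 return None
--
--     if current_state in final_states:
--         return ('str', lex)
-- ===== SOURCE B (Python) =====
-- def afd_str(lex):
--     s = str(lex)
--     if len(s) >= 2 and s[0] == '"' and s[-1] == '"' and '"' not in s[1:-1]:
--         return ('str', lex)
--     return None
-- ===== Notes on version B (the rewrite author's own statement) =====
-- stated objective: simpler
-- what changed: Replaces the explicit DFA table and per-character state loop with a direct structural check: length >= 2, first and last characters are '"', and no '"' in the interior slice.
import Mathlib
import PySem

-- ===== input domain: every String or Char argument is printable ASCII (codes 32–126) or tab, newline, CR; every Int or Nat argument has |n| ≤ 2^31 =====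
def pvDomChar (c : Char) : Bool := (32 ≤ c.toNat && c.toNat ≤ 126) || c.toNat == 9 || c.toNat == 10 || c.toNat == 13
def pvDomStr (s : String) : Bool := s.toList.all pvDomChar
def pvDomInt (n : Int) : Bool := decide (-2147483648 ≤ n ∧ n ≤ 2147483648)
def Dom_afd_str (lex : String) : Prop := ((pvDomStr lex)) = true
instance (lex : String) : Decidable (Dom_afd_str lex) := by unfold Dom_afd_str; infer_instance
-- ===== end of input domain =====

-- B replaces A's per-character DFA state loop with a direct structural check
-- (first char '"', last char '"', no '"' in the interior slice); objective: simpler.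

-- ===== PORT A =====
-- the DFA transition loop of A: state 0 --'"'/--> 1; state 1 stays 1 on any char,
-- '"' sends it to 2; state 2 has no transitions (afd[2] = {}), so afd[st].get(word)
-- is `some 1` exactly for st = 0 and word = '"', else `none` (hand-inlined dict, exact);
-- `none` is A's early `return None`.
def afd_str_loop : List Char → Int → Option Int
  | [], st => some st
  | c :: rest, st =>
    if st = 1 then
      afd_str_loop rest (if c = '"' then 2 else 1)   -- afd[1].get(word, 1)
    else
      match (if st = 0 ∧ c = '"' then some (1 : Int) else none) with
      | some st' => afd_str_loop rest st'
      | none => none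

def afd_str (lex : String) : Option (String × String) :=
  match afd_str_loop lex.toList 0 with
  | none => none
  | some st => if st ∈ ([2] : List Int) then some ("str", lex) else none

-- ===== PORT B =====
def afd_str_alt (lex : String) : Option (String × String) :=
  let s := lex.toList
  if 2 ≤ s.length ∧ PySem.List.pyGet? s 0 = some '"' ∧ PySem.List.pyGet? s (-1) = some '"'
      ∧ '"' ∉ PySem.List.slice s (some 1) (some (-1)) then
    some ("str", lex)
  else
    none

-- ===== PRECONDITION & SPEC =====
def Spec_afd_str (lex : String) (out : Option (String × String)) : Prop := out = afd_str_alt lex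
instance (lex : String) (out : Option (String × String)) : Decidable (Spec_afd_str lex out) := by unfold Spec_afd_str; infer_instance

-- ===== CLAIM (what is proved, stated in full; the proofs are below) =====
def Claim_equal_afd_str : Prop := ∀ (lex : String), Dom_afd_str lex → Spec_afd_str lex (afd_str lex)

-- ===== LEMMAS AND PROOFS =====

-- from state 1 the loop only ever yields none, state 1 or state 2
theorem afd_loop_one_vals (cs : List Char) :
    afd_str_loop cs 1 = none ∨ afd_str_loop cs 1 = some 1 ∨ afd_str_loop cs 1 = some 2 := by
  induction cs with
  | nil => simp [afd_str_loop]
  | cons c rest ih =>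
    by_cases hc : c = '"'
    · cases rest with
      | nil => simp [afd_str_loop, hc]
      | cons d ds => simp [afd_str_loop, hc]
    · simpa [afd_str_loop, hc] using ih

-- characterisation of acceptance from state 1: the rest ends with '"' and has no earlier '"'
theorem afd_loop_one_iff (cs : List Char) :
    afd_str_loop cs 1 = some 2 ↔ cs.getLast? = some '"' ∧ '"' ∉ cs.dropLast := by
  induction cs with
  | nil => simp [afd_str_loop]
  | cons c rest ih =>
    by_cases hc : c = '"'
    · subst hc
      cases rest with
      | nil => simp [afd_str_loop]
      | cons d ds => simp [afd_str_loop]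
    · cases rest with
      | nil => simp [afd_str_loop, hc]
      | cons d ds =>
        rw [show afd_str_loop (c :: d :: ds) 1 = afd_str_loop (d :: ds) 1 by
              simp [afd_str_loop, hc]]
        rw [ih]
        simp [Ne.symm hc]

-- B's interior slice s[1:-1] on a cons is dropLast of the tail
theorem slice_one_neg_one (c : Char) (cs : List Char) :
    PySem.List.slice (c :: cs) (some 1) (some (-1)) = cs.dropLast := by
  simp [PySem.List.slice, PySem.List.clampIdx]
  rw [if_neg (by omega)]
  exact List.dropLast_eq_take.symm

-- B's s[0] on a cons
theorem pyGet?_cons_zero (c : Char) (cs : List Char) :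
    PySem.List.pyGet? (c :: cs) 0 = some c := by
  simp [PySem.List.pyGet?, PySem.List.pyIdx?]

-- ===== VERDICT (by name: the statement is the Claim_ definition above) =====
theorem afd_str_spec : Claim_equal_afd_str := by
  intro lex _
  unfold Spec_afd_str afd_str afd_str_alt
  cases hs : lex.toList with
  | nil => simp [afd_str_loop]
  | cons c cs =>
    by_cases hc : c = '"'
    · subst hc
      have hstep : afd_str_loop ('"' :: cs) 0 = afd_str_loop cs 1 := by
        simp [afd_str_loop]
      rw [hstep]
      by_cases h : afd_str_loop cs 1 = some 2
      · have h2 := (afd_loop_one_iff cs).mp h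
        rw [h]
        cases cs with
        | nil => simp at h2
        | cons d ds =>
          have hcond : 2 ≤ ('"' :: d :: ds : List Char).length ∧
              PySem.List.pyGet? ('"' :: d :: ds) 0 = some '"' ∧
              PySem.List.pyGet? ('"' :: d :: ds) (-1) = some '"' ∧
              '"' ∉ PySem.List.slice ('"' :: d :: ds) (some 1) (some (-1)) := by
            refine ⟨by simp, pyGet?_cons_zero _ _, ?_, ?_⟩
            · rw [PySem.List.pyGet?_neg_one]; simpa using h2.1
            · rw [slice_one_neg_one]; exact h2.2
          rw [if_pos hcond]
          simp
      · have h2 := h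
        rw [afd_loop_one_iff] at h2
        have hne : ∀ r, afd_str_loop cs 1 = r →
            (match r with
              | none => (none : Option (String × String))
              | some st => if st ∈ ([2] : List Int) then some ("str", lex) else none) = none := by
          intro r hr
          rcases afd_loop_one_vals cs with hv | hv | hv <;> rw [hr] at hv <;> subst hv
          · rfl
          · simp
          · exact absurd hr h
        rw [hne _ rfl]
        cases cs with
        | nil => simp
        | cons d ds =>
          refine (if_neg ?_).symm
          rintro ⟨-, -, hlast, hint⟩
          rw [PySem.List.pyGet?_neg_one] at hlast
          rw [slice_one_neg_one] at hint
          exact h2 ⟨by simpa using hlast, hint⟩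
    · have h0 : afd_str_loop (c :: cs) 0 = none := by simp [afd_str_loop, hc]
      rw [h0]
      refine (if_neg ?_).symm
      rintro ⟨-, hfirst, -, -⟩
      rw [pyGet?_cons_zero] at hfirst
      exact hc (by simpa using hfirst)
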